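-- pv_equiv track=rewrite | github.com/yashbonde/o2f | prepare_data.py | get_ubi_dist
-- ===== SOURCE A (Python) =====
-- def get_ubi_dist(N=3, p1=1, p2=1, l=1):
--     """goto: generating_expressions.md
--
--     First step is to define all the unary-binary trees it is done in two steps:
--     1. iterate over the 2N possible nodes so each index corresponds to a n value
--     2. change the axis so each index now correspond to e value
--
--     N = 3 gives the following output:
--     (1) --> [[0, 1, 1, 1, 1],
--              [0, 2, 4, 6],
--              [0, 6, 16],
--              [0, 22],
--              [0]]
--     (2) --> [[0, 0, 0, 0, 0],
--              [1, 2, 6, 22],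
--              [1, 4, 16],
--              [1, 6],
--              [1]]
--
--     Or think it like this:
--         n = 0  1  2  3  4
--           +---------------
--     e = 0 | 0  0  0  0  0
--     e = 1 | 1  2  6  22
--     e = 2 | 1  4  16
--     e = 3 | 1  6
--     e = 4 | 1
--
--     So you can see that we get D(0,n) = 0, D(e,0) = 1 and so on
--
--     :param N: maximum number of operations to add
--     :param p1: number of unary operations
--     :param p2: number of binary operations
--     :param l: number of leaves in the stack
--     """
--
--     # (1)
--     D_ubi = []
--     D_ubi.append([0] + [l**i for i in range(1, 2*N + 1)])
--     for _n in range(1, 2*N + 1):  # number of operators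
--         s = [0]
--         for _e in range(1, 2*N - _n + 1):  # number of empty nodes
--             s.append(l * s[_e-1] + p1*D_ubi[_n-1][_e] + p2*D_ubi[_n-1][_e+1])
--         D_ubi.append(s)
--     assert all(len(D_ubi[i]) >= len(D_ubi[i+1]) for i in range(len(D_ubi) - 1))
--
--     # (2)
--     dubi = []
--     longest_tree_size = max(len(x) for x in D_ubi)
--     for i in range(longest_tree_size):  # iterate over longest tree
--         this_ubi = []  # for this iteration
--         for _tree in D_ubi:
--             if i < len(_tree):
--                 this_ubi.append(_tree[i])
--         dubi.append(this_ubi)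
--     return dubi
-- ===== SOURCE B (Python) =====
-- def get_ubi_dist(N=3, p1=1, p2=1, l=1):
--     """Anti-diagonal wavefront: evaluate the recurrence cell-by-cell in order of
--     s = n + e (each anti-diagonal depends only on the previous diagonal and on
--     the cell just computed on the current one), storing diagonals instead of
--     rows; the transposed jagged output is then read off as diags[k+e][k].
--     No seeded first row and no transpose phase."""
--     M = 2 * N if N > 0 else 0
--     diags = []  # diags[s][n] = D(n, s - n)
--     for s in range(M + 1):
--         diag = []
--         for n in range(s + 1):
--             e = s - n
--             if n == 0:
--                 v = l ** e if e else 0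
--             elif e == 0:
--                 v = 0
--             else:
--                 v = l * diags[s - 1][n] + p1 * diags[s - 1][n - 1] + p2 * diag[n - 1]
--             diag.append(v)
--         diags.append(diag)
--     return [[diags[k + e][k] for k in range(M - e + 1)] for e in range(M + 1)]
-- ===== Notes on version B (the rewrite author's own statement) =====
-- stated objective: alternative
-- what changed: Replaces the row-major DP (seeded first row, row-by-row loop, then a separate transpose pass) by an anti-diagonal wavefront: cells are computed in order of s = n + e from the previous diagonal and the cell just computed on the current one, base cases handled per cell, and the jagged transposed output is read off directly as diags[k+e][k] with no transpose phase.
import Mathlib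
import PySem

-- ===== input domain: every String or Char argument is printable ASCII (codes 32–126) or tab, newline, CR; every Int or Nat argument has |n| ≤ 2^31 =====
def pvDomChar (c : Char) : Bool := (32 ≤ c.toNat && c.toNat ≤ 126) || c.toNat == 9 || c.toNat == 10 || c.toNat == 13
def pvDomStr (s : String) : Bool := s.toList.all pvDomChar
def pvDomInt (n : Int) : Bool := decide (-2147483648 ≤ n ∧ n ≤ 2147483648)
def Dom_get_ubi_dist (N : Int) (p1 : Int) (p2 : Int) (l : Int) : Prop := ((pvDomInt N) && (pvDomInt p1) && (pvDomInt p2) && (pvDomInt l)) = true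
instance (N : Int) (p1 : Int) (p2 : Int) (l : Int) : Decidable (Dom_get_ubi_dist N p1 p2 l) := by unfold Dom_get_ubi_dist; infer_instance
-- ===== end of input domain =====

-- B replaces A's row-major DP + transpose phase by an anti-diagonal wavefront over the
-- same recurrence, reading the jagged transposed output off directly (objective: alternative).

-- ===== PORT A =====
-- literal port of A: phase (1) builds the full row table D_ubi, phase (2) transposes it.
-- 'l**i' (i ≥ 1 here) is ported as 'l ^ i.toNat' (exact for nonnegative exponents);
-- the Python assert always holds (row lengths are non-increasing) and is a no-op;
-- 'max(…)' over the nonempty generator is PySem.List.max?, its .getD 0 is never taken.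
def get_ubi_dist (N : Int) (p1 : Int) (p2 : Int) (l : Int) : List (List Int) :=
  let row0 : List Int := 0 :: (PySem.List.pyRange 1 (2*N+1) 1).map (fun i => l ^ i.toNat)
  let D : List (List Int) := (PySem.List.pyRange 1 (2*N+1) 1).foldl (fun D _n =>
      D ++ [(PySem.List.pyRange 1 (2*N - _n + 1) 1).foldl (fun s _e =>
          s ++ [l * PySem.List.pyGetD s (_e-1) 0
                + p1 * PySem.List.pyGetD (PySem.List.pyGetD D (_n-1) []) _e 0
                + p2 * PySem.List.pyGetD (PySem.List.pyGetD D (_n-1) []) (_e+1) 0]) [0]]) [row0]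
  let longest : Int := (PySem.List.max? (D.map (fun x => (x.length : Int))) (fun x => x)).getD 0
  (PySem.List.pyRange 0 longest 1).foldl (fun dubi i =>
      dubi ++ [D.foldl (fun this _tree =>
          if i < (_tree.length : Int) then this ++ [PySem.List.pyGetD _tree i 0] else this) []]) []

-- ===== PORT B =====
-- literal port of Source B: diagonals in order of s = n + e; 'l ** e if e else 0' is
-- 'if e ≠ 0 then l ^ e.toNat else 0' (e ≥ 0 here, so toNat is exact); list indexing
-- diags[s-1][n], diag[n-1], diags[k+e][k] is PySem.List.pyGetD (always in range here).
def get_ubi_dist_alt (N : Int) (p1 : Int) (p2 : Int) (l : Int) : List (List Int) :=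
  let M : Int := if N > 0 then 2*N else 0
  let diags : List (List Int) := (PySem.List.pyRange 0 (M+1) 1).foldl (fun diags s =>
      diags ++ [(PySem.List.pyRange 0 (s+1) 1).foldl (fun diag n =>
          let e := s - n
          diag ++ [if n = 0 then (if e ≠ 0 then l ^ e.toNat else 0)
                   else if e = 0 then 0
                   else l * PySem.List.pyGetD (PySem.List.pyGetD diags (s-1) []) n 0
                        + p1 * PySem.List.pyGetD (PySem.List.pyGetD diags (s-1) []) (n-1) 0
                        + p2 * PySem.List.pyGetD diag (n-1) 0]) []]) []
  (PySem.List.pyRange 0 (M+1) 1).map (fun e =>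
    (PySem.List.pyRange 0 (M - e + 1) 1).map (fun k =>
      PySem.List.pyGetD (PySem.List.pyGetD diags (k+e) []) k 0))

-- ===== PRECONDITION & SPEC =====
def Spec_get_ubi_dist (N : Int) (p1 : Int) (p2 : Int) (l : Int) (out : List (List Int)) : Prop := out = get_ubi_dist_alt N p1 p2 l
instance (N : Int) (p1 : Int) (p2 : Int) (l : Int) (out : List (List Int)) : Decidable (Spec_get_ubi_dist N p1 p2 l out) := by unfold Spec_get_ubi_dist; infer_instance

-- ===== CLAIM (what is proved, stated in full; the proofs are below) =====
def Claim_equal_get_ubi_dist : Prop := ∀ (N : Int) (p1 : Int) (p2 : Int) (l : Int), Dom_get_ubi_dist N p1 p2 l → Spec_get_ubi_dist N p1 p2 l (get_ubi_dist N p1 p2 l)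

-- ===== LEMMAS AND PROOFS =====

-- the shared mathematical cell value D(n, e) of the recurrence
def pvD (p1 p2 l : Int) : Nat → Nat → Int
  | 0, 0 => 0
  | 0, e+1 => l ^ (e+1)
  | _+1, 0 => 0
  | n+1, e+1 => l * pvD p1 p2 l (n+1) e + p1 * pvD p1 p2 l n (e+1) + p2 * pvD p1 p2 l n (e+2)
termination_by n e => (n, e)

-- the s-th anti-diagonal
def pvDiag (p1 p2 l : Int) (s : Nat) : List Int :=
  (List.range (s+1)).map (fun n => pvD p1 p2 l n (s-n))

-- the next row of the table, as A's fixed-prev inner loop computes it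
def pvRowNext (N p1 p2 l n : Int) (prev : List Int) : List Int :=
  (PySem.List.pyRange 1 (2*N - n + 1) 1).foldl (fun s _e =>
      s ++ [l * PySem.List.pyGetD s (_e-1) 0
            + p1 * PySem.List.pyGetD prev _e 0
            + p2 * PySem.List.pyGetD prev (_e+1) 0]) [0]

-- the k-th row of the table
def pvRows (N p1 p2 l : Int) : Nat → List Int
  | 0 => 0 :: (PySem.List.pyRange 1 (2*N+1) 1).map (fun i => l ^ i.toNat)
  | k+1 => pvRowNext N p1 p2 l ((k : Int)+1) (pvRows N p1 p2 l k)

-- a fold whose body appends exactly one element adds the list's length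
theorem pv_foldl_append_one_length {α γ : Type} (xs : List γ) (f : List α → γ → α) :
    ∀ (s : List α), (xs.foldl (fun s x => s ++ [f s x]) s).length = s.length + xs.length := by
  induction xs with
  | nil => simp
  | cons x xs ih => intro s; simp [List.foldl_cons, ih]; omega

theorem pv_len_pvRowNext (N p1 p2 l n : Int) (prev : List Int) :
    (pvRowNext N p1 p2 l n prev).length = 1 + (2*N - n).toNat := by
  unfold pvRowNext
  rw [pv_foldl_append_one_length (f := fun s _e =>
      l * PySem.List.pyGetD s (_e-1) 0 + p1 * PySem.List.pyGetD prev _e 0 + p2 * PySem.List.pyGetD prev (_e+1) 0)]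
  simp [PySem.List.length_pyRange_one]

theorem pv_len_pvRows (N p1 p2 l : Int) (k : Nat) :
    (pvRows N p1 p2 l k).length = 1 + (2*N - k).toNat := by
  cases k with
  | zero => simp [pvRows, PySem.List.length_pyRange_one]; omega
  | succ k => rw [pvRows, pv_len_pvRowNext]; push_cast; ring_nf

theorem pv_tableA (N p1 p2 l : Int) :
    ∀ (d m : Nat), (2*N).toNat = m + d →
    (PySem.List.pyRange ((m : Int)+1) (2*N+1) 1).foldl (fun D _n =>
      D ++ [(PySem.List.pyRange 1 (2*N - _n + 1) 1).foldl (fun s _e =>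
          s ++ [l * PySem.List.pyGetD s (_e-1) 0
                + p1 * PySem.List.pyGetD (PySem.List.pyGetD D (_n-1) []) _e 0
                + p2 * PySem.List.pyGetD (PySem.List.pyGetD D (_n-1) []) (_e+1) 0]) [0]])
      ((List.range (m+1)).map (pvRows N p1 p2 l))
    = (List.range ((2*N).toNat + 1)).map (pvRows N p1 p2 l) := by
  intro d
  induction d with
  | zero =>
    intro m hm
    rw [PySem.List.pyRange_one_eq_nil (by omega)]
    simp only [List.foldl_nil]
    have : m = (2*N).toNat := by omega
    rw [this]
  | succ d ih =>
    intro m hm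
    have hlt : (m : Int) + 1 < 2*N + 1 := by omega
    rw [PySem.List.pyRange_one_cons hlt]
    simp only [List.foldl_cons]
    have hD : PySem.List.pyGetD ((List.range (m+1)).map (pvRows N p1 p2 l)) (((m:Int)+1)-1) []
        = pvRows N p1 p2 l m := by
      have h1 : ((m:Int)+1)-1 = ((m : Nat) : Int) := by omega
      rw [h1, PySem.List.pyGetD_natCast, List.getD_eq_getElem _ _ (by simp)]
      simp
    rw [hD]
    have hrow : (PySem.List.pyRange 1 (2*N - ((m:Int)+1) + 1) 1).foldl (fun s _e =>
          s ++ [l * PySem.List.pyGetD s (_e-1) 0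
                + p1 * PySem.List.pyGetD (pvRows N p1 p2 l m) _e 0
                + p2 * PySem.List.pyGetD (pvRows N p1 p2 l m) (_e+1) 0]) [0]
        = pvRows N p1 p2 l (m+1) := rfl
    rw [hrow]
    have hcast : ((m:Int)+1)+1 = (((m+1 : Nat)) : Int) + 1 := by push_cast; ring
    rw [show List.map (pvRows N p1 p2 l) (List.range (m+1)) ++ [pvRows N p1 p2 l (m+1)]
          = List.map (pvRows N p1 p2 l) (List.range (m+1+1)) from by
        simp [List.range_succ], hcast]
    exact ih (m+1) (by omega)

-- A's phase (2) (longest + transpose), abstracted over the finished table (proof helper)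
def pvPhase2 (D : List (List Int)) : List (List Int) :=
  (PySem.List.pyRange 0 ((PySem.List.max? (D.map (fun x => (x.length : Int))) (fun x => x)).getD 0) 1).foldl
    (fun dubi i =>
      dubi ++ [D.foldl (fun this _tree =>
          if i < (_tree.length : Int) then this ++ [PySem.List.pyGetD _tree i 0] else this) []]) []

theorem pv_foldl_max_le (a : Int) : ∀ t : List Int, (∀ y ∈ t, y ≤ a) → t.foldl max a = a := by
  intro t
  induction t with
  | nil => intro _; rfl
  | cons x t ih =>
    intro h
    simp only [List.foldl_cons]
    rw [max_eq_left (h x (by simp))]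
    exact ih (fun y hy => h y (by simp [hy]))

theorem pv_foldl_filter {α β : Type} (P : α → Prop) [DecidablePred P] (f : α → β) :
    ∀ (xs : List α) (acc : List β),
    xs.foldl (fun acc x => if P x then acc ++ [f x] else acc) acc
      = acc ++ (xs.filter (fun x => decide (P x))).map f := by
  intro xs
  induction xs with
  | nil => intro acc; simp
  | cons x xs ih =>
    intro acc
    by_cases h : P x <;> simp [h, ih]

theorem pv_filter_range (m : Nat) : ∀ n, (List.range n).filter (fun k => decide (k < m)) = List.range (min m n) := by
  intro n
  induction n with
  | zero => simp
  | succ n ih =>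
    rw [List.range_succ, List.filter_append, ih]
    by_cases h : n < m
    · rw [show min m (n+1) = n + 1 from by omega, show min m n = n from by omega, List.range_succ]
      simp [h]
    · rw [show min m (n+1) = min m n from by omega]
      simp [h]

theorem pv_A_eq (N p1 p2 l : Int) :
    get_ubi_dist N p1 p2 l
    = (List.range ((2*N).toNat + 1)).map (fun j =>
        (List.range ((2*N).toNat - j + 1)).map (fun k => PySem.List.pyGetD (pvRows N p1 p2 l k) (j : Int) 0)) := by
  have h1 : get_ubi_dist N p1 p2 l = pvPhase2 ((PySem.List.pyRange 1 (2*N+1) 1).foldl (fun D _n =>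
      D ++ [(PySem.List.pyRange 1 (2*N - _n + 1) 1).foldl (fun s _e =>
          s ++ [l * PySem.List.pyGetD s (_e-1) 0
                + p1 * PySem.List.pyGetD (PySem.List.pyGetD D (_n-1) []) _e 0
                + p2 * PySem.List.pyGetD (PySem.List.pyGetD D (_n-1) []) (_e+1) 0]) [0]])
      [pvRows N p1 p2 l 0]) := rfl
  rw [h1]
  have hT : (PySem.List.pyRange 1 (2*N+1) 1).foldl (fun D _n =>
      D ++ [(PySem.List.pyRange 1 (2*N - _n + 1) 1).foldl (fun s _e =>
          s ++ [l * PySem.List.pyGetD s (_e-1) 0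
                + p1 * PySem.List.pyGetD (PySem.List.pyGetD D (_n-1) []) _e 0
                + p2 * PySem.List.pyGetD (PySem.List.pyGetD D (_n-1) []) (_e+1) 0]) [0]])
      [pvRows N p1 p2 l 0]
      = (List.range ((2*N).toNat + 1)).map (pvRows N p1 p2 l) := by
    have h := pv_tableA N p1 p2 l (2*N).toNat 0 (by omega)
    push_cast at h
    simpa [List.range_one] using h
  rw [hT]
  unfold pvPhase2
  have hlong : (PySem.List.max? (((List.range ((2*N).toNat + 1)).map (pvRows N p1 p2 l)).map
        (fun x => (x.length : Int))) (fun x => x)).getD 0 = (((2*N).toNat + 1 : Nat) : Int) := by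
    rw [List.map_map, List.range_succ_eq_map, List.map_cons, PySem.List.max?_id_cons, Option.getD_some]
    rw [pv_foldl_max_le]
    · simp [Function.comp, pv_len_pvRows]; omega
    · intro y hy
      simp only [List.mem_map, Function.comp] at hy
      obtain ⟨k, hk, rfl⟩ := hy
      simp [pv_len_pvRows]
      omega
  rw [hlong, PySem.List.pyRange_zero_nat, PySem.List.foldl_append_singleton_eq_map, List.nil_append,
    List.map_map]
  apply List.map_congr_left
  intro j hj
  simp only [List.mem_range] at hj
  simp only [Function.comp]
  rw [pv_foldl_filter (fun t => (j : Int) < (t.length : Int)) (fun t => PySem.List.pyGetD t (j:Int) 0)]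
  rw [List.nil_append, List.filter_map, List.map_map]
  rw [List.filter_congr (q := fun k => decide (k < (2*N).toNat - j + 1)) (by
    intro k hk
    simp only [List.mem_range] at hk
    simp only [Function.comp, pv_len_pvRows, decide_eq_decide]
    push_cast
    omega)]
  rw [pv_filter_range, show min ((2*N).toNat - j + 1) ((2*N).toNat + 1) = (2*N).toNat - j + 1 from by omega]
  rfl

-- ===== A's rows carry the cell values pvD =====

theorem pv_rowNext_fold (N p1 p2 l : Int) (n : Nat) (prev : List Int)
    (hp : ∀ j : Nat, (j : Int) ≤ 2*N - n → PySem.List.pyGetD prev (j : Int) 0 = pvD p1 p2 l n j)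
    (hn1 : (n : Int) + 1 ≤ 2*N) :
    pvRowNext N p1 p2 l ((n : Int)+1) prev
      = (List.range ((2*N - ((n : Int)+1)).toNat + 1)).map (pvD p1 p2 l (n+1)) := by
  unfold pvRowNext
  suffices key : ∀ m : Nat, m ≤ (2*N - ((n:Int)+1)).toNat →
      (PySem.List.pyRange 1 ((m:Int)+1) 1).foldl (fun s _e =>
        s ++ [l * PySem.List.pyGetD s (_e-1) 0
              + p1 * PySem.List.pyGetD prev _e 0
              + p2 * PySem.List.pyGetD prev (_e+1) 0]) [0]
      = (List.range (m+1)).map (pvD p1 p2 l (n+1)) by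
    have h := key (2*N - ((n:Int)+1)).toNat (le_refl _)
    rw [show ((((2*N - ((n:Int)+1)).toNat : Nat)):Int) + 1 = 2*N - ((n:Int)+1) + 1 from by omega] at h
    exact h
  intro m
  induction m with
  | zero =>
    intro _
    rw [show ((0:Nat):Int) + 1 = 1 from by norm_num, PySem.List.pyRange_one_eq_nil (by omega)]
    simp [pvD]
  | succ m ih =>
    intro hm
    rw [show (((m+1:Nat)):Int) + 1 = ((m:Int)+1) + 1 from by push_cast; ring,
      PySem.List.pyRange_one_succ_right (by omega), List.foldl_append, ih (by omega)]
    simp only [List.foldl_cons, List.foldl_nil]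
    have hs : PySem.List.pyGetD ((List.range (m+1)).map (pvD p1 p2 l (n+1))) (((m:Int)+1)-1) 0
        = pvD p1 p2 l (n+1) m := by
      rw [show ((m:Int)+1)-1 = ((m:Nat):Int) from by omega, PySem.List.pyGetD_natCast,
        List.getD_eq_getElem _ _ (by simp)]
      simp
    have hp1 : PySem.List.pyGetD prev ((m:Int)+1) 0 = pvD p1 p2 l n (m+1) := by
      rw [show (m:Int)+1 = (((m+1:Nat)):Int) from by push_cast; ring]
      exact hp (m+1) (by omega)
    have hp2 : PySem.List.pyGetD prev (((m:Int)+1)+1) 0 = pvD p1 p2 l n (m+2) := by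
      rw [show ((m:Int)+1)+1 = (((m+2:Nat)):Int) from by push_cast; ring]
      exact hp (m+2) (by omega)
    rw [hs, hp1, hp2, show (List.range (m+1+1)) = List.range (m+1) ++ [m+1] from List.range_succ]
    rw [List.map_append, List.map_cons, List.map_nil]
    congr 2
    conv_rhs => rw [pvD]

theorem pv_rows_get (N p1 p2 l : Int) :
    ∀ (k j : Nat), (k : Int) + j ≤ 2*N →
    PySem.List.pyGetD (pvRows N p1 p2 l k) (j : Int) 0 = pvD p1 p2 l k j := by
  intro k
  induction k with
  | zero =>
    intro j hj
    cases j with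
    | zero => simp [pvRows, PySem.List.pyGetD_zero_cons, pvD]
    | succ j =>
      rw [pvRows, PySem.List.pyGetD_natCast, List.getD_eq_getElem _ _ (by
        simp [PySem.List.length_pyRange_one]; omega)]
      rw [List.getElem_cons_succ, List.getElem_map, PySem.List.getElem_pyRange_one]
      rw [show (1 + (j:Int)).toNat = j + 1 from by omega]
      simp [pvD]
  | succ k ih =>
    intro j hj
    rw [pvRows, pv_rowNext_fold N p1 p2 l k (pvRows N p1 p2 l k)
      (fun j' hj' => ih j' (by omega)) (by omega)]
    rw [PySem.List.pyGetD_natCast, List.getD_eq_getElem _ _ (by simp; omega)]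
    simp

-- ===== B's diagonals carry the cell values pvD =====

theorem pv_diag_fold (p1 p2 l : Int) (s : Nat) (diags : List (List Int))
    (hd : ∀ t : Nat, t < s → PySem.List.pyGetD diags (t : Int) [] = pvDiag p1 p2 l t) :
    (PySem.List.pyRange 0 ((s:Int)+1) 1).foldl (fun diag n =>
        let e := (s:Int) - n
        diag ++ [if n = 0 then (if e ≠ 0 then l ^ e.toNat else 0)
                 else if e = 0 then 0
                 else l * PySem.List.pyGetD (PySem.List.pyGetD diags ((s:Int)-1) []) n 0
                      + p1 * PySem.List.pyGetD (PySem.List.pyGetD diags ((s:Int)-1) []) (n-1) 0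
                      + p2 * PySem.List.pyGetD diag (n-1) 0]) []
    = pvDiag p1 p2 l s := by
  suffices key : ∀ m : Nat, m ≤ s + 1 →
      (PySem.List.pyRange 0 (m:Int) 1).foldl (fun diag n =>
        let e := (s:Int) - n
        diag ++ [if n = 0 then (if e ≠ 0 then l ^ e.toNat else 0)
                 else if e = 0 then 0
                 else l * PySem.List.pyGetD (PySem.List.pyGetD diags ((s:Int)-1) []) n 0
                      + p1 * PySem.List.pyGetD (PySem.List.pyGetD diags ((s:Int)-1) []) (n-1) 0
                      + p2 * PySem.List.pyGetD diag (n-1) 0]) []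
      = (List.range m).map (fun n => pvD p1 p2 l n (s-n)) by
    have h := key (s+1) (le_refl _)
    rw [show (((s+1:Nat)):Int) = (s:Int)+1 from by push_cast; ring] at h
    rw [h]; rfl
  intro m
  induction m with
  | zero => intro _; simp
  | succ m ih =>
    intro hm
    rw [show (((m+1:Nat)):Int) = (m:Int) + 1 from by push_cast; ring,
      PySem.List.pyRange_one_succ_right (by omega), List.foldl_append, ih (by omega)]
    simp only [List.foldl_cons, List.foldl_nil]
    rw [show (List.range (m+1)) = List.range m ++ [m] from List.range_succ, List.map_append,
      List.map_cons, List.map_nil]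
    congr 2
    by_cases hm0 : m = 0
    · subst hm0
      simp only [Nat.cast_zero]
      cases s with
      | zero => simp [pvD]
      | succ t =>
        simp [pvD]
        intro h
        exact absurd h (by omega)
    · rw [if_neg (by omega)]
      by_cases hms : m = s
      · rw [if_pos (by omega)]
        subst hms
        rw [show m - m = 0 from by omega]
        rcases Nat.exists_eq_succ_of_ne_zero hm0 with ⟨m', rfl⟩
        simp [pvD]
      · have hmlt : m < s := by omega
        rw [if_neg (by omega)]
        have hsd : PySem.List.pyGetD diags ((s:Int)-1) [] = pvDiag p1 p2 l (s-1) := by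
          rw [show (s:Int)-1 = (((s-1:Nat)):Int) from by omega]
          exact hd (s-1) (by omega)
        have hg1 : PySem.List.pyGetD (pvDiag p1 p2 l (s-1)) ((m:Nat):Int) 0
            = pvD p1 p2 l m (s-1-m) := by
          rw [PySem.List.pyGetD_natCast, pvDiag, List.getD_eq_getElem _ _ (by simp; omega)]
          simp
        have hg2 : PySem.List.pyGetD (pvDiag p1 p2 l (s-1)) ((m:Int)-1) 0
            = pvD p1 p2 l (m-1) (s-m) := by
          rw [show (m:Int)-1 = (((m-1:Nat)):Int) from by omega, PySem.List.pyGetD_natCast,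
            pvDiag, List.getD_eq_getElem _ _ (by simp; omega)]
          simp
          rw [show s - 1 - (m - 1) = s - m from by omega]
        have hg3 : PySem.List.pyGetD ((List.range m).map (fun n => pvD p1 p2 l n (s-n))) ((m:Int)-1) 0
            = pvD p1 p2 l (m-1) (s-(m-1)) := by
          rw [show (m:Int)-1 = (((m-1:Nat)):Int) from by omega, PySem.List.pyGetD_natCast,
            List.getD_eq_getElem _ _ (by simp; omega)]
          simp
        rw [hsd, hg1, hg2, hg3]
        rcases Nat.exists_eq_succ_of_ne_zero hm0 with ⟨m', rfl⟩
        obtain ⟨e', he⟩ : ∃ e', s - (m'+1) = e' + 1 := ⟨s - (m'+1) - 1, by omega⟩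
        rw [he, show s - 1 - (m'+1) = e' from by omega, show (m'+1) - 1 = m' from by omega,
          show s - m' = e' + 2 from by omega]
        conv_rhs => rw [pvD]

theorem pv_diags_fold (p1 p2 l M : Int) (hM0 : 0 ≤ M) :
    ∀ (d m : Nat), M.toNat + 1 = m + d →
    (PySem.List.pyRange ((m:Int)) (M+1) 1).foldl (fun diags s =>
      diags ++ [(PySem.List.pyRange 0 (s+1) 1).foldl (fun diag n =>
          let e := s - n
          diag ++ [if n = 0 then (if e ≠ 0 then l ^ e.toNat else 0)
                   else if e = 0 then 0
                   else l * PySem.List.pyGetD (PySem.List.pyGetD diags (s-1) []) n 0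
                        + p1 * PySem.List.pyGetD (PySem.List.pyGetD diags (s-1) []) (n-1) 0
                        + p2 * PySem.List.pyGetD diag (n-1) 0]) []])
      ((List.range m).map (pvDiag p1 p2 l))
    = (List.range (M.toNat + 1)).map (pvDiag p1 p2 l) := by
  intro d
  induction d with
  | zero =>
    intro m hm
    rw [PySem.List.pyRange_one_eq_nil (by omega)]
    simp only [List.foldl_nil]
    have : m = M.toNat + 1 := by omega
    rw [this]
  | succ d ih =>
    intro m hm
    have hlt : (m : Int) < M + 1 := by omega
    rw [PySem.List.pyRange_one_cons hlt]
    simp only [List.foldl_cons]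
    rw [pv_diag_fold p1 p2 l m ((List.range m).map (pvDiag p1 p2 l)) (fun t ht => by
      rw [PySem.List.pyGetD_natCast, List.getD_eq_getElem _ _ (by simp [ht])]
      simp)]
    rw [show (List.range m).map (pvDiag p1 p2 l) ++ [pvDiag p1 p2 l m]
          = (List.range (m+1)).map (pvDiag p1 p2 l) from by simp [List.range_succ]]
    rw [show (m:Int) + 1 = (((m+1:Nat)):Int) from by push_cast; ring]
    exact ih (m+1) (by omega)

theorem pv_B_eq (N p1 p2 l : Int) (M : Int) (hM : M = if N > 0 then 2*N else 0) :
    get_ubi_dist_alt N p1 p2 l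
    = (List.range (M.toNat + 1)).map (fun e =>
        (List.range (M.toNat - e + 1)).map (fun k => pvD p1 p2 l k e)) := by
  have hM0 : 0 ≤ M := by rw [hM]; split <;> omega
  have hMn : (M.toNat : Int) = M := by omega
  have hdiags : (PySem.List.pyRange 0 (M+1) 1).foldl (fun diags s =>
      diags ++ [(PySem.List.pyRange 0 (s+1) 1).foldl (fun diag n =>
          let e := s - n
          diag ++ [if n = 0 then (if e ≠ 0 then l ^ e.toNat else 0)
                   else if e = 0 then 0
                   else l * PySem.List.pyGetD (PySem.List.pyGetD diags (s-1) []) n 0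
                        + p1 * PySem.List.pyGetD (PySem.List.pyGetD diags (s-1) []) (n-1) 0
                        + p2 * PySem.List.pyGetD diag (n-1) 0]) []]) []
      = (List.range (M.toNat + 1)).map (pvDiag p1 p2 l) := by
    have h := pv_diags_fold p1 p2 l M hM0 (M.toNat + 1) 0 (by omega)
    simpa using h
  simp only [get_ubi_dist_alt]
  rw [← hM, hdiags]
  rw [show M + 1 = (((M.toNat + 1 : Nat)):Int) from by omega, PySem.List.pyRange_zero_nat,
    List.map_map]
  apply List.map_congr_left
  intro e he
  simp only [List.mem_range] at he
  simp only [Function.comp]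
  rw [show M - (e:Int) + 1 = (((M.toNat - e + 1 : Nat)):Int) from by omega,
    PySem.List.pyRange_zero_nat, List.map_map]
  apply List.map_congr_left
  intro k hk
  simp only [List.mem_range] at hk
  simp only [Function.comp]
  have h1 : PySem.List.pyGetD ((List.range (M.toNat+1)).map (pvDiag p1 p2 l)) (((k+e:Nat)):Int) []
      = pvDiag p1 p2 l (k+e) := by
    rw [PySem.List.pyGetD_natCast, List.getD_eq_getElem _ _ (by simp; omega)]
    simp
  rw [show (k:Int) + (e:Int) = (((k+e:Nat)):Int) from by push_cast; ring, h1]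
  rw [pvDiag, PySem.List.pyGetD_natCast, List.getD_eq_getElem _ _ (by simp),
    List.getElem_map, List.getElem_range, Nat.add_sub_cancel_left]

-- ===== VERDICT (by name: the statement is the Claim_ definition above) =====
theorem get_ubi_dist_spec : Claim_equal_get_ubi_dist := by
  intro N p1 p2 l _
  show get_ubi_dist N p1 p2 l = get_ubi_dist_alt N p1 p2 l
  rw [pv_A_eq, pv_B_eq N p1 p2 l (if N > 0 then 2*N else 0) rfl,
    show (if N > 0 then 2*N else (0:Int)).toNat = (2*N).toNat from by split <;> omega]
  by_cases hN : 0 < N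
  · apply List.map_congr_left
    intro j hj
    simp only [List.mem_range] at hj
    apply List.map_congr_left
    intro k hk
    simp only [List.mem_range] at hk
    exact pv_rows_get N p1 p2 l k j (by omega)
  · rw [show (2*N).toNat = 0 from by omega]
    simp [pvRows, pvD]
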